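-- pv_equiv track=rewrite | github.com/julgitt/University_tasks | sztuczna_inteligencja/pracownia3/zad2/main.py | get_all_line_uncertain_indexes
-- ===== SOURCE A (Python) =====
-- from typing import List, Tuple, Set
--
-- def get_all_line_uncertain_indexes(is_col: bool, idx: int,
--                                    domains: Tuple[List[List[List[int]]], List[List[List[int]]]]) -> Set[int]:
--     uncertain_line_cells = set()
--     line_cells_on = set()
--     line_cells_off = set()
--     if len(domains[is_col][idx]) == 0:
--         return uncertain_line_cells
--
--     for i, bit in enumerate(domains[is_col][idx][0]):
--         uncertain_line_cells.add(i)
--         if bit == 1: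
--             line_cells_on.add(i)
--         elif bit == 0:
--             line_cells_off.add(i)
--
--     if len(domains[is_col][idx]) == 1:
--         return uncertain_line_cells
--
--     for example_solution in domains[is_col][idx][1:]:
--         for i, bit in enumerate(example_solution):
--             if bit == 1:
--                 try:
--                     line_cells_off.remove(i)
--                 except KeyError:
--                     pass
--             elif bit == 0:
--                 try:
--                     line_cells_on.remove(i)
--                 except KeyError:
--                     pass
--
--     uncertain_line_cells.difference_update(line_cells_on)
--     uncertain_line_cells.difference_update(line_cells_off)
--     return uncertain_line_cells
-- ===== SOURCE B (Python) =====
-- def get_all_line_uncertain_indexes(is_col, idx, domains):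
--     solutions = domains[is_col][idx]
--     if not solutions:
--         return set()
--     first, rest = solutions[0], solutions[1:]
--     if not rest:
--         # with a single example solution every cell of the line counts as uncertain
--         return set(range(len(first)))
--
--     def certain(i, bit):
--         if bit == 1:
--             return all(i >= len(ex) or ex[i] != 0 for ex in rest)
--         if bit == 0:
--             return all(i >= len(ex) or ex[i] != 1 for ex in rest)
--         return False
--
--     return {i for i, bit in enumerate(first) if not certain(i, bit)}
-- ===== Notes on version B (the rewrite author's own statement) =====
-- stated objective: simpler
-- what changed: Replaces A's row-by-row maintenance of on/off sets with try/remove and two difference_updates by a direct per-cell column scan: for each cell of the first example, decide certainty with one all(...) over the later examples.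
import Mathlib
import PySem

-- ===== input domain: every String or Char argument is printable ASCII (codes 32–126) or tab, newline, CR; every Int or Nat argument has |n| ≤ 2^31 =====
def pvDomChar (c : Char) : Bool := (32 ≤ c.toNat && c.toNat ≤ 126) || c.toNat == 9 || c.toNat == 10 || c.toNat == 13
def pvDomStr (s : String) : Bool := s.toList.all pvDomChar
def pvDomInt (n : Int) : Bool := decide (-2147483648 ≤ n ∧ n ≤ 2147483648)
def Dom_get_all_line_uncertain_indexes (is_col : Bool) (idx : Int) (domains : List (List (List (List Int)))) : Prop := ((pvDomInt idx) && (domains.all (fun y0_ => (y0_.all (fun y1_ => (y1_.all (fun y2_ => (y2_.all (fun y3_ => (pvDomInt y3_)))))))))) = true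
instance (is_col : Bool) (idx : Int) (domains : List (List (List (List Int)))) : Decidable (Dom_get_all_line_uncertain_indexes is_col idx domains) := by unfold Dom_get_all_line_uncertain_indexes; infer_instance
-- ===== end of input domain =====

-- B replaces A's row-by-row on/off set maintenance (try-remove + difference_update) by a direct
-- per-cell column scan over the later example solutions; objective: simpler, same asymptotic cost.

-- ===== PORT A =====
-- domains[is_col][idx] (bool indexes like an int; negative idx wraps); total under Pre_
def pvLine (is_col : Bool) (idx : Int) (domains : List (List (List (List Int)))) : List (List Int) :=
  PySem.List.pyGetD (PySem.List.pyGetD domains (if is_col then 1 else 0) []) idx []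

-- the body of A's first loop: add i to uncertain, then to on (bit==1) or off (bit==0)
def pvStepInit (st : List Int × List Int × List Int) (p : Int × Int) : List Int × List Int × List Int :=
  let u := PySem.Set.add st.1 p.1
  if p.2 = 1 then (u, PySem.Set.add st.2.1 p.1, st.2.2)
  else if p.2 = 0 then (u, st.2.1, PySem.Set.add st.2.2 p.1)
  else (u, st.2.1, st.2.2)

-- the body of A's second loop: try remove (= discard) from off (bit==1) or on (bit==0)
def pvStepEx (st : List Int × List Int) (p : Int × Int) : List Int × List Int :=
  if p.2 = 1 then (st.1, PySem.Set.discard st.2 p.1)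
  else if p.2 = 0 then (PySem.Set.discard st.1 p.1, st.2)
  else st

def pvACore (sols : List (List Int)) : List Int :=
  if sols.length = 0 then PySem.Set.empty
  else
    let first := PySem.List.pyGetD sols 0 []
    let init := (PySem.List.enumerate first 0).foldl pvStepInit
                  (PySem.Set.empty, PySem.Set.empty, PySem.Set.empty)
    if sols.length = 1 then init.1
    else
      let onoff := (PySem.List.slice sols (some 1) none).foldl
                     (fun st ex => (PySem.List.enumerate ex 0).foldl pvStepEx st)
                     (init.2.1, init.2.2)
      PySem.Set.diff (PySem.Set.diff init.1 onoff.1) onoff.2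

def get_all_line_uncertain_indexes (is_col : Bool) (idx : Int) (domains : List (List (List (List Int)))) : List Int :=
  pvACore (pvLine is_col idx domains)

-- ===== PORT B =====
def pvCertain (i : Int) (bit : Int) (rest : List (List Int)) : Bool :=
  if bit = 1 then rest.all (fun ex => decide ((ex.length : Int) ≤ i) || decide (PySem.List.pyGet? ex i ≠ some 0))
  else if bit = 0 then rest.all (fun ex => decide ((ex.length : Int) ≤ i) || decide (PySem.List.pyGet? ex i ≠ some 1))
  else false

def pvBCore (sols : List (List Int)) : List Int :=
  match sols with
  | [] => PySem.Set.empty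
  | first :: rest =>
    if rest.isEmpty then PySem.Set.ofList (PySem.List.pyRange 0 (first.length : Int) 1)
    else PySem.Set.ofList (((PySem.List.enumerate first 0).filter
            (fun p => !(pvCertain p.1 p.2 rest))).map (fun p => p.1))

def get_all_line_uncertain_indexes_alt (is_col : Bool) (idx : Int) (domains : List (List (List (List Int)))) : List Int :=
  pvBCore (pvLine is_col idx domains)

-- ===== PRECONDITION & SPEC =====
-- Pre_ excludes exactly the inputs where Python A raises IndexError: domains[is_col] or
-- domains[is_col][idx] out of range (negative indices wrap, as in Python).
def Pre_get_all_line_uncertain_indexes (is_col : Bool) (idx : Int) (domains : List (List (List (List Int)))) : Prop :=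
  PySem.Raise.InRange domains.length (if is_col then 1 else 0) ∧
  PySem.Raise.InRange (PySem.List.pyGetD domains (if is_col then 1 else 0) []).length idx
instance (is_col : Bool) (idx : Int) (domains : List (List (List (List Int)))) : Decidable (Pre_get_all_line_uncertain_indexes is_col idx domains) := by unfold Pre_get_all_line_uncertain_indexes; infer_instance

def pvWitness_get_all_line_uncertain_indexes : Bool × Int × List (List (List (List Int))) :=
  (false, 0, [[[[1, 0], [1, 1]]]])

def Spec_get_all_line_uncertain_indexes (is_col : Bool) (idx : Int) (domains : List (List (List (List Int)))) (out : List Int) : Prop := out = get_all_line_uncertain_indexes_alt is_col idx domains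
instance (is_col : Bool) (idx : Int) (domains : List (List (List (List Int)))) (out : List Int) : Decidable (Spec_get_all_line_uncertain_indexes is_col idx domains out) := by unfold Spec_get_all_line_uncertain_indexes; infer_instance

-- ===== CLAIM (what is proved, stated in full; the proofs are below) =====
def Claim_equal_get_all_line_uncertain_indexes : Prop := ∀ (is_col : Bool) (idx : Int) (domains : List (List (List (List Int)))), Dom_get_all_line_uncertain_indexes is_col idx domains → Pre_get_all_line_uncertain_indexes is_col idx domains → Spec_get_all_line_uncertain_indexes is_col idx domains (get_all_line_uncertain_indexes is_col idx domains)

-- ===== LEMMAS AND PROOFS =====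

theorem pvWitness_ok : Dom_get_all_line_uncertain_indexes pvWitness_get_all_line_uncertain_indexes.1 pvWitness_get_all_line_uncertain_indexes.2.1 pvWitness_get_all_line_uncertain_indexes.2.2 ∧ Pre_get_all_line_uncertain_indexes pvWitness_get_all_line_uncertain_indexes.1 pvWitness_get_all_line_uncertain_indexes.2.1 pvWitness_get_all_line_uncertain_indexes.2.2 := by
  decide

-- first-components of an enumerate list are pairwise injective
theorem pvFstInj (ps : List (Int × Int)) (hnd : (ps.map (fun p => p.1)).Nodup)
    {p q : Int × Int} (hp : p ∈ ps) (hq : q ∈ ps) (h : p.1 = q.1) : p = q := by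
  by_contra hne
  have hpair : ps.Pairwise (fun a b : Int × Int => a.1 ≠ b.1) := List.pairwise_map.mp hnd
  exact (hpair.forall (fun a b hab => hab.symm) hp hq hne) h

theorem pvFoldInit (ps : List (Int × Int)) (u on off : List Int)
    (hnd : (ps.map (fun p => p.1)).Nodup)
    (hu : ∀ p ∈ ps, p.1 ∉ u) (hon : ∀ p ∈ ps, p.1 ∉ on) (hoff : ∀ p ∈ ps, p.1 ∉ off) :
    ps.foldl pvStepInit (u, on, off) =
      (u ++ ps.map (fun p => p.1),
       on ++ (ps.filter (fun p => decide (p.2 = 1))).map (fun p => p.1),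
       off ++ (ps.filter (fun p => decide (p.2 = 0))).map (fun p => p.1)) := by
  induction ps generalizing u on off with
  | nil => simp
  | cons p ps ih =>
    obtain ⟨i, b⟩ := p
    simp only [List.map_cons, List.nodup_cons] at hnd
    have hiu : i ∉ u := hu _ (List.mem_cons_self ..)
    have hion : i ∉ on := hon _ (List.mem_cons_self ..)
    have hioff : i ∉ off := hoff _ (List.mem_cons_self ..)
    have hfresh : ∀ p ∈ ps, p.1 ≠ i := by
      intro p hp hpe
      exact hnd.1 (hpe ▸ List.mem_map_of_mem hp)
    have hstep : pvStepInit (u, on, off) (i, b) =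
        (u ++ [i], if b = 1 then on ++ [i] else on, if b = 0 then off ++ [i] else off) := by
      simp only [pvStepInit, PySem.Set.add_of_not_mem hiu, PySem.Set.add_of_not_mem hion,
        PySem.Set.add_of_not_mem hioff]
      by_cases hb1 : b = 1 <;> by_cases hb0 : b = 0 <;> simp_all
    have hu' : ∀ p ∈ ps, p.1 ∉ u ++ [i] := by
      intro p hp
      simp only [List.mem_append, List.mem_singleton]
      exact fun h => h.elim (hu p (List.mem_cons_of_mem _ hp)) (hfresh p hp)
    have hon' : ∀ p ∈ ps, p.1 ∉ (if b = 1 then on ++ [i] else on) := by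
      intro p hp
      have h1 := hon p (List.mem_cons_of_mem _ hp)
      have h2 := hfresh p hp
      by_cases hb1 : b = 1 <;> simp [hb1, List.mem_append] <;> tauto
    have hoff' : ∀ p ∈ ps, p.1 ∉ (if b = 0 then off ++ [i] else off) := by
      intro p hp
      have h1 := hoff p (List.mem_cons_of_mem _ hp)
      have h2 := hfresh p hp
      by_cases hb0 : b = 0 <;> simp [hb0, List.mem_append] <;> tauto
    rw [List.foldl_cons, hstep, ih _ _ _ hnd.2 hu' hon' hoff']
    by_cases hb1 : b = 1 <;> by_cases hb0 : b = 0 <;>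
      simp_all [List.append_assoc]

theorem pvDiscardFilter (s : List Int) (x : Int) :
    PySem.Set.discard s x = s.filter (fun y => !(decide (y = x))) := by
  rfl

theorem pvFoldEx (ps : List (Int × Int)) (on off : List Int) :
    ps.foldl pvStepEx (on, off) =
      (on.filter (fun x => ps.all (fun p => !(decide (p.2 = 0) && decide (p.1 = x)))),
       off.filter (fun x => ps.all (fun p => !(decide (p.2 = 1) && decide (p.1 = x))))) := by
  induction ps generalizing on off with
  | nil => simp
  | cons p ps ih =>
    obtain ⟨i, b⟩ := p
    have hstep : pvStepEx (on, off) (i, b) =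
        (if b = 0 then PySem.Set.discard on i else on,
         if b = 1 then PySem.Set.discard off i else off) := by
      by_cases hb1 : b = 1 <;> by_cases hb0 : b = 0 <;> simp_all [pvStepEx]
    have hmerge : ∀ (s : List Int) (P : Int → Bool),
        (PySem.Set.discard s i).filter P = s.filter (fun x => !(decide (i = x)) && P x) := by
      intro s P
      rw [pvDiscardFilter, List.filter_filter]
      apply List.filter_congr
      intro x hx
      by_cases hxi : x = i
      · simp [hxi]
      · have hix : ¬ i = x := fun h => hxi h.symm
        simp [hix]
        exact fun _ => hxi
    rw [List.foldl_cons, hstep, ih]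
    refine Prod.ext ?_ ?_
    · show List.filter _ (if b = 0 then PySem.Set.discard on i else on) = _
      by_cases hb0 : b = 0
      · rw [if_pos hb0, hmerge]
        apply List.filter_congr
        intro x hx
        subst hb0
        simp [List.all_cons]
      · rw [if_neg hb0]
        apply List.filter_congr
        intro x hx
        simp [List.all_cons, hb0]
    · show List.filter _ (if b = 1 then PySem.Set.discard off i else off) = _
      by_cases hb1 : b = 1
      · rw [if_pos hb1, hmerge]
        apply List.filter_congr
        intro x hx
        subst hb1
        simp [List.all_cons]
      · rw [if_neg hb1]
        apply List.filter_congr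
        intro x hx
        simp [List.all_cons, hb1]

theorem pvFoldRest (rest : List (List Int)) (on off : List Int) :
    rest.foldl (fun st ex => (PySem.List.enumerate ex 0).foldl pvStepEx st) (on, off) =
      (on.filter (fun x => rest.all (fun ex => (PySem.List.enumerate ex 0).all
         (fun p => !(decide (p.2 = 0) && decide (p.1 = x))))),
       off.filter (fun x => rest.all (fun ex => (PySem.List.enumerate ex 0).all
         (fun p => !(decide (p.2 = 1) && decide (p.1 = x)))))) := by
  induction rest generalizing on off with
  | nil => simp
  | cons ex rest ih =>
    rw [List.foldl_cons, pvFoldEx, ih]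
    refine Prod.ext ?_ ?_ <;>
    · dsimp only
      rw [List.filter_filter]
      apply List.filter_congr
      intro x hx
      simp [List.all_cons, Bool.and_comm]


theorem pvColScan (ex : List Int) (i c : Int) (hi : 0 ≤ i) :
    ((PySem.List.enumerate ex 0).all (fun p => !(decide (p.2 = c) && decide (p.1 = i)))) =
    (decide ((ex.length : Int) ≤ i) || decide (PySem.List.pyGet? ex i ≠ some c)) := by
  rw [Bool.eq_iff_iff]
  simp only [List.all_eq_true, PySem.List.mem_enumerate_iff, Bool.or_eq_true, decide_eq_true_eq,
    Bool.not_eq_true', Bool.and_eq_false_iff, decide_eq_false_iff_not]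
  constructor
  · intro h
    by_cases hlen : (ex.length : Int) ≤ i
    · exact Or.inl hlen
    · refine Or.inr ?_
      rw [PySem.List.pyGet?_of_nonneg ex hi]
      have hilt : i.toNat < ex.length := by omega
      rw [List.getElem?_eq_getElem hilt]
      intro hc
      have := h (i, ex[i.toNat]) ⟨i.toNat, hilt, by simp; omega⟩
      rcases this with h1 | h1
      · exact h1 (by simpa using hc)
      · exact h1 rfl
  · intro h p hp
    obtain ⟨k, hk, rfl⟩ := hp
    rcases h with h | h
    · right; simp; omega
    · by_cases hik : (0 : Int) + k = i
      · left
        intro hc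
        apply h
        rw [PySem.List.pyGet?_of_nonneg ex hi]
        have : i.toNat = k := by omega
        rw [this, List.getElem?_eq_getElem hk]
        simpa using hc
      · right; exact hik

theorem pvDiffFilter (s t : List Int) :
    PySem.Set.diff s t = s.filter (fun y => !(PySem.Set.contains t y)) := by rfl

theorem pvMemProj (ps : List (Int × Int)) (hnd : (ps.map (fun p => p.1)).Nodup)
    (f : Int × Int → Bool) {p : Int × Int} (hp : p ∈ ps) :
    p.1 ∈ (ps.filter f).map (fun q => q.1) ↔ f p = true := by
  constructor
  · intro h
    obtain ⟨q, hq, hqe⟩ := List.mem_map.mp h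
    have hq' := List.mem_filter.mp hq
    have : q = p := pvFstInj ps hnd hq'.1 hp hqe
    exact this ▸ hq'.2
  · intro h
    exact List.mem_map_of_mem (List.mem_filter.mpr ⟨hp, h⟩)

theorem pvEmptyEq : (PySem.Set.empty : List Int) = [] := rfl

theorem pvCore (sols : List (List Int)) : pvACore sols = pvBCore sols := by
  cases sols with
  | nil => rfl
  | cons first rest =>
    have hfirst : PySem.List.pyGetD (first :: rest) 0 [] = first := by
      simp [PySem.List.pyGetD]
    have hnd : (((PySem.List.enumerate first 0)).map (fun p => p.1)).Nodup := by
      rw [PySem.List.map_fst_enumerate]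
      exact PySem.List.nodup_pyRange_one _ _
    have hinit := pvFoldInit (PySem.List.enumerate first 0) [] [] [] hnd
      (by simp) (by simp) (by simp)
    cases rest with
    | nil =>
      have hA : pvACore [first] = (List.foldl pvStepInit ([], [], [])
          (PySem.List.enumerate first 0)).1 := rfl
      have hB : pvBCore [first] = PySem.Set.ofList (PySem.List.pyRange 0 (first.length : Int) 1) := rfl
      rw [hA, hB, hinit, PySem.Set.ofList_eq_self_of_nodup _ (PySem.List.nodup_pyRange_one _ _),
        PySem.List.map_fst_enumerate]
      simp
    | cons ex rest' =>
      rw [pvACore, pvBCore]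
      have hlen0 : ¬ (first :: ex :: rest').length = 0 := by simp
      have hlen1 : ¬ (first :: ex :: rest').length = 1 := by simp
      rw [if_neg hlen0, if_neg hlen1]
      simp only [pvEmptyEq, hfirst, hinit]
      rw [if_neg (by simp : ¬ (ex :: rest').isEmpty = true)]
      rw [PySem.List.slice_from_one]
      show PySem.Set.diff (PySem.Set.diff _ _) _ = _
      rw [List.tail_cons]
      set ps := PySem.List.enumerate first 0 with hps
      rw [pvFoldRest]
      rw [pvDiffFilter, pvDiffFilter, List.filter_filter]
      -- rewrite the left side to a map of a filter over ps
      rw [List.nil_append, List.nil_append, List.nil_append, List.filter_map]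
      -- drop the ofList on the right
      have hndB : ((ps.filter (fun p => !(pvCertain p.1 p.2 (ex :: rest')))).map (fun p => p.1)).Nodup :=
        ((List.filter_sublist).map (fun p : Int × Int => p.1)).nodup hnd
      rw [PySem.Set.ofList_eq_self_of_nodup _ hndB]
      apply congrArg (List.map (fun p : Int × Int => p.1))
      apply List.filter_congr
      intro p hp
      obtain ⟨k, hk, rfl⟩ := (PySem.List.mem_enumerate_iff _ _ _).mp hp
      have hi : (0 : Int) ≤ 0 + (k : Int) := by positivity
      have hmem1 : ((0 : Int) + (k : Int) ∈ (ps.filter (fun p => decide (p.2 = 1))).map (fun p => p.1)) ↔ first[k] = (1 : Int) := by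
        simpa using pvMemProj ps hnd (fun p => decide (p.2 = 1)) hp
      have hmem0 : ((0 : Int) + (k : Int) ∈ (ps.filter (fun p => decide (p.2 = 0))).map (fun p => p.1)) ↔ first[k] = (0 : Int) := by
        simpa using pvMemProj ps hnd (fun p => decide (p.2 = 0)) hp
      have hall0 : (((ex :: rest').all (fun e => (PySem.List.enumerate e 0).all
            (fun q => !(decide (q.2 = 0) && decide (q.1 = (0 : Int) + (k : Int))))))) =
          ((ex :: rest').all (fun e => decide ((e.length : Int) ≤ (0 : Int) + (k : Int)) || decide (PySem.List.pyGet? e ((0 : Int) + (k : Int)) ≠ some 0))) :=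
        List.all_congr rfl (fun e => pvColScan e ((0 : Int) + (k : Int)) 0 hi)
      have hall1 : (((ex :: rest').all (fun e => (PySem.List.enumerate e 0).all
            (fun q => !(decide (q.2 = 1) && decide (q.1 = (0 : Int) + (k : Int))))))) =
          ((ex :: rest').all (fun e => decide ((e.length : Int) ≤ (0 : Int) + (k : Int)) || decide (PySem.List.pyGet? e ((0 : Int) + (k : Int)) ≠ some 1))) :=
        List.all_congr rfl (fun e => pvColScan e ((0 : Int) + (k : Int)) 1 hi)
      simp only [Function.comp_apply]
      rw [Bool.eq_iff_iff]
      simp only [Bool.and_eq_true, Bool.not_eq_true', PySem.Set.contains_eq_listContains,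
        List.contains_eq_mem, decide_eq_false_iff_not, List.mem_filter, hmem1, hmem0,
        hall0, hall1]
      simp only [pvCertain]
      by_cases hb1 : first[k] = (1 : Int) <;> by_cases hb0 : first[k] = (0 : Int)
      · rw [hb1] at hb0; exact absurd hb0 (by norm_num)
      · simp [hb1]
      · simp [hb0]
      · simp [hb1, hb0]

-- ===== VERDICT (by name: the statement is the Claim_ definition above) =====
theorem get_all_line_uncertain_indexes_spec : Claim_equal_get_all_line_uncertain_indexes := by
  intro is_col idx domains _ _
  unfold Spec_get_all_line_uncertain_indexes get_all_line_uncertain_indexes get_all_line_uncertain_indexes_alt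
  exact pvCore _
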